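-- pv_equiv track=rewrite | github.com/jbrry/Irish-BERT | scripts/split_tokenised_text_into_sentences.py | is_decimal_number
-- ===== SOURCE A (Python) =====
-- def is_decimal_number(s):
--     s = s.strip()
--     for c in s:
--         if c not in '0123456789':
--             return False
--     if s.startswith('0') and len(s) > 1:
--         return False
--     return len(s) > 0
-- ===== SOURCE B (Python) =====
-- import re
--
-- def is_decimal_number(s):
--     return bool(re.fullmatch(r'0|[1-9][0-9]*', s.strip()))
-- ===== Notes on version B (the rewrite author's own statement) =====
-- stated objective: idiomatic
-- what changed: Replaces the explicit per-character loop plus separate startswith/len guards with a single ASCII regex fullmatch r'0|[1-9][0-9]*' on the stripped string.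
import Mathlib
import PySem

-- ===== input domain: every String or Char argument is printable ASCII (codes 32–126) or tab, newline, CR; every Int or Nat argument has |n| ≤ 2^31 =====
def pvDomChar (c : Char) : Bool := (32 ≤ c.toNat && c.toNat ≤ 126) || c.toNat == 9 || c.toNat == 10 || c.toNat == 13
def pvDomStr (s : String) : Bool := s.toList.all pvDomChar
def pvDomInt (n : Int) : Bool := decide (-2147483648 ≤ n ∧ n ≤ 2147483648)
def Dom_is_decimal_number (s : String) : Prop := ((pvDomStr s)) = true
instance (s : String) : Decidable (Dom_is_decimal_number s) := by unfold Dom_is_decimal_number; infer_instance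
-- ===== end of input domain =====

-- B replaces A's explicit character loop and separate startswith/len guards by one
-- regex fullmatch r'0|[1-9][0-9]*' on the stripped string (more idiomatic, same cost).

-- ===== PORT A =====
-- the for-loop with its early 'return False': none = fell through, some b = returned b
def pvALoop : List Char → Option Bool
  | [] => none
  | c :: r => if ("0123456789".toList).contains c then pvALoop r else some false

def is_decimal_number (s : String) : Bool :=
  let t := PySem.Str.strip s
  match pvALoop t.toList with
  | some b => b
  | none =>
    if PySem.Str.startswith t "0" && decide (PySem.Str.len t > 1) then false
    else decide (PySem.Str.len t > 0)

-- ===== PORT B =====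
-- the regex engine's semantics for the anchored pattern 0|[1-9][0-9]*  (re.fullmatch)
def pvReMatch : List Char → Bool
  | [] => false
  | c :: r =>
    (decide (c = '0') && decide (r = [])) ||
    (decide ('1' ≤ c) && decide (c ≤ '9') && r.all (fun d => decide ('0' ≤ d) && decide (d ≤ '9')))

def is_decimal_number_alt (s : String) : Bool :=
  pvReMatch (PySem.Str.strip s).toList

-- ===== PRECONDITION & SPEC =====
def Spec_is_decimal_number (s : String) (out : Bool) : Prop := out = is_decimal_number_alt s
instance (s : String) (out : Bool) : Decidable (Spec_is_decimal_number s out) := by unfold Spec_is_decimal_number; infer_instance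

-- ===== CLAIM (what is proved, stated in full; the proofs are below) =====
def Claim_equal_is_decimal_number : Prop := ∀ (s : String), Dom_is_decimal_number s → Spec_is_decimal_number s (is_decimal_number s)

-- ===== LEMMAS AND PROOFS =====

theorem pv_char_le_iff (a b : Char) : a ≤ b ↔ a.toNat ≤ b.toNat := by
  rw [Char.le_def, UInt32.le_iff_toNat_le]; rfl

theorem pv_char_eq_iff (c d : Char) : c = d ↔ c.toNat = d.toNat := by
  constructor
  · exact fun h => h ▸ rfl
  · intro h
    apply Char.ext
    exact UInt32.toNat_inj.mp h

theorem pv_digits_list : "0123456789".toList = ['0','1','2','3','4','5','6','7','8','9'] := by decide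

-- membership in '0123456789' is exactly the code-point range check of [0-9]
theorem pv_digit_mem (c : Char) :
    (("0123456789".toList).contains c) = (decide ('0' ≤ c) && decide (c ≤ '9')) := by
  rw [Bool.eq_iff_iff, pv_digits_list]
  simp only [List.contains_eq_any_beq, List.any_eq_true, beq_iff_eq, Bool.and_eq_true,
    decide_eq_true_eq, pv_char_le_iff]
  have e : ('0':Char).toNat = 48 ∧ ('1':Char).toNat = 49 ∧ ('2':Char).toNat = 50 ∧
      ('3':Char).toNat = 51 ∧ ('4':Char).toNat = 52 ∧ ('5':Char).toNat = 53 ∧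
      ('6':Char).toNat = 54 ∧ ('7':Char).toNat = 55 ∧ ('8':Char).toNat = 56 ∧
      ('9':Char).toNat = 57 := by decide
  obtain ⟨e0,e1,e2,e3,e4,e5,e6,e7,e8,e9⟩ := e
  simp only [List.mem_cons, List.not_mem_nil, or_false, pv_char_eq_iff, e0,e1,e2,e3,e4,e5,e6,e7,e8,e9]
  constructor
  · rintro ⟨x, hx, hcx⟩; omega
  · rintro ⟨h1, h2⟩
    exact ⟨c, by omega, rfl⟩

theorem pv_aloop_none {cs : List Char}
    (h : cs.all (fun d => decide ('0' ≤ d) && decide (d ≤ '9')) = true) :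
    pvALoop cs = none := by
  induction cs with
  | nil => rfl
  | cons c r ih =>
    simp only [List.all_cons, Bool.and_eq_true] at h
    have hc : (("0123456789".toList).contains c) = true := by
      rw [pv_digit_mem]; simp [h.1.1, h.1.2]
    simp only [pvALoop, hc, if_true]
    exact ih h.2

theorem pv_aloop_some {cs : List Char}
    (h : cs.all (fun d => decide ('0' ≤ d) && decide (d ≤ '9')) = false) :
    pvALoop cs = some false := by
  induction cs with
  | nil => simp at h
  | cons c r ih =>
    by_cases hc : (decide ('0' ≤ c) && decide (c ≤ '9')) = true
    · have hr : r.all (fun d => decide ('0' ≤ d) && decide (d ≤ '9')) = false := by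
        simp only [List.all_cons, hc, Bool.true_and] at h
        exact h
      have hm : (("0123456789".toList).contains c) = true := by rw [pv_digit_mem]; exact hc
      simp only [pvALoop, hm, if_true]
      exact ih hr
    · have hm : (("0123456789".toList).contains c) = false := by
        rw [pv_digit_mem]; simpa using hc
      simp only [pvALoop, hm]
      simp

theorem pv_startswith_zero (c : Char) (r : List Char) :
    PySem.Chars.startswith (c :: r) ['0'] = decide (c = '0') := by
  rw [Bool.eq_iff_iff]
  simp only [PySem.Chars.startswith_iff, decide_eq_true_eq]
  constructor
  · rintro ⟨t, ht⟩
    injection ht with h1 _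
    exact h1.symm
  · rintro rfl
    exact ⟨r, rfl⟩

-- the core equality, on the stripped character list
theorem pv_key (cs : List Char) :
    (match pvALoop cs with
      | some b => b
      | none =>
        if PySem.Chars.startswith cs ['0'] && decide (cs.length > 1) then false
        else decide (cs.length > 0)) = pvReMatch cs := by
  have e0 : ('0':Char).toNat = 48 := by decide
  have e1 : ('1':Char).toNat = 49 := by decide
  have e9 : ('9':Char).toNat = 57 := by decide
  cases cs with
  | nil => decide
  | cons c r =>
    by_cases hd : (decide ('0' ≤ c) && decide (c ≤ '9')) = true
    · have hdn : 48 ≤ c.toNat ∧ c.toNat ≤ 57 := by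
        simpa [pv_char_le_iff, e0, e9] using hd
      by_cases hall : r.all (fun d => decide ('0' ≤ d) && decide (d ≤ '9')) = true
      · have hn : pvALoop (c :: r) = none := by
          apply pv_aloop_none
          simp only [List.all_cons, hall, Bool.and_true]
          exact hd
        rw [hn]
        simp only [pv_startswith_zero, pvReMatch, hall, Bool.and_true]
        by_cases hc0 : c = '0'
        · cases r with
          | nil => simp [hc0]
          | cons d r' => simp [hc0]
        · have h1c : ('1' : Char) ≤ c := by
            rw [pv_char_le_iff, e1]
            rcases Nat.lt_or_ge 48 c.toNat with h | h
            · omega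
            · exact absurd (pv_char_eq_iff c '0' |>.mpr (by omega)) hc0
          have h9c : c ≤ ('9' : Char) := by rw [pv_char_le_iff, e9]; exact hdn.2
          cases r with
          | nil => simp [hc0, h1c, h9c]
          | cons d r' => simp [hc0, h1c, h9c]
      · have hs : pvALoop (c :: r) = some false := by
          apply pv_aloop_some
          simp only [List.all_cons, Bool.and_eq_false_iff]
          right; simpa using hall
        rw [hs]
        have hrne : r ≠ [] := by
          rintro rfl; simp at hall
        have hall' : r.all (fun d => decide ('0' ≤ d) && decide (d ≤ '9')) = false := by
          simpa using hall
        simp [pvReMatch, hrne, hall']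
    · have hb : (decide ('0' ≤ c) && decide (c ≤ '9')) = false := by
        simpa using hd
      have hs : pvALoop (c :: r) = some false := by
        apply pv_aloop_some
        simp only [List.all_cons, hb, Bool.false_and]
      rw [hs]
      clear hb
      have hnat : ¬ (48 ≤ c.toNat ∧ c.toNat ≤ 57) := by
        intro ⟨a, b⟩
        exact hd (by simp [pv_char_le_iff, e0, e9, a, b])
      clear hd
      have hc0 : ¬ (c = '0') := by
        intro h; rw [pv_char_eq_iff, e0] at h; omega
      have h19 : (decide ('1' ≤ c) && decide (c ≤ '9')) = false := by
        rw [Bool.and_eq_false_iff]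
        rcases Nat.lt_or_ge c.toNat 49 with h | h
        · left; simp [pv_char_le_iff, e1]; omega
        · right; simp [pv_char_le_iff, e9]; omega
      simp [pvReMatch, hc0, h19]

-- ===== VERDICT (by name: the statement is the Claim_ definition above) =====
theorem is_decimal_number_spec : Claim_equal_is_decimal_number := by
  intro s _
  unfold Spec_is_decimal_number is_decimal_number is_decimal_number_alt
  have h := pv_key (PySem.Str.strip s).toList
  simpa using h
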